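-- pv_equiv track=rewrite | github.com/quarcs-lab/metricsai | verify_ch01_04_consistency.py | find_section_gaps
-- ===== SOURCE A (Python) =====
-- def find_section_gaps(sections):
--     """Identify gaps in section numbering"""
--     if not sections:
--         return []
--
--     gaps = []
--     major = sections[0]['major']
--
--     # Group by major section
--     by_major = {}
--     for s in sections:
--         if s['major'] not in by_major:
--             by_major[s['major']] = []
--         by_major[s['major']].append(s['minor'])
--
--     # Check for gaps within each major section
--     for maj, minors in by_major.items():
--         minors_sorted = sorted(minors)
--         for i in range(len(minors_sorted) - 1):
--             current = minors_sorted[i]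
--             next_num = minors_sorted[i + 1]
--             if next_num - current > 1:
--                 for missing in range(current + 1, next_num):
--                     gaps.append(f"{maj}.{missing}")
--
--     return gaps
-- ===== SOURCE B (Python) =====
-- def find_section_gaps(sections):
--     """Identify gaps in section numbering"""
--     if not sections:
--         return []
--
--     # Group minors into a set per major (insertion order of majors preserved)
--     by_major = {}
--     for s in sections:
--         by_major.setdefault(s['major'], set()).add(s['minor'])
--
--     gaps = []
--     for maj, minors in by_major.items():
--         lo, hi = min(minors), max(minors)
--         gaps.extend(f"{maj}.{i}" for i in range(lo + 1, hi) if i not in minors)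
--     return gaps
-- ===== Notes on version B (the rewrite author's own statement) =====
-- stated objective: alternative
-- what changed: B groups each major's minors into a set and emits every integer in range(min+1, max) that is absent from the set, instead of A's sort-then-scan of adjacent pairs emitting per-pair ranges.
import Mathlib
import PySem

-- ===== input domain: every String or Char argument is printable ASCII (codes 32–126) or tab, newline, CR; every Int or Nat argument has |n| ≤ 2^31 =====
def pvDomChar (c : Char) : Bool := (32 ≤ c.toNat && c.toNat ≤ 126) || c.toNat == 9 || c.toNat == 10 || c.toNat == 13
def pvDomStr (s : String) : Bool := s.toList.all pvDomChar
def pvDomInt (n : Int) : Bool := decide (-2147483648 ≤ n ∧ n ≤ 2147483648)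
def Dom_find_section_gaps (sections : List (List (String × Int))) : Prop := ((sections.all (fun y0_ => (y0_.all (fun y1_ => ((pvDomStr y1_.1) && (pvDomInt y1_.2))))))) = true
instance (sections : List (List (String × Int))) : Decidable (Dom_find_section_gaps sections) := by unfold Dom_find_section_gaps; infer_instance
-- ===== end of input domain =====

-- B replaces A's sort-then-scan-adjacent-pairs per major section by a set of minors per major plus one
-- sweep of range(min+1, max) with a membership test (objective: alternative traversal, same cost class).

-- s[k] for one section record (shared by both ports); the .getD 0 arm is unreachable under Pre_
-- (Python raises KeyError there)
def pvGetItem (s : List (String × Int)) (k : String) : Int :=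
  ((PySem.Dict.mk s).get? k).getD 0

-- ===== PORT A =====
def find_section_gaps (sections : List (List (String × Int))) : List String :=
  if sections = [] then []
  else
    -- major = sections[0]['major']  (bound but never used by A)
    let _major := pvGetItem (sections.headD []) "major"
    let by_major : PySem.Dict Int (List Int) :=
      sections.foldl (fun d s =>
        let d' := if d.contains (pvGetItem s "major") then d else d.insert (pvGetItem s "major") []
        d'.modify (pvGetItem s "major") [] (fun l => l ++ [pvGetItem s "minor"])) PySem.Dict.empty
    by_major.items.foldl (fun gaps p =>
      let minors_sorted := PySem.List.sorted p.2 (fun x => x) false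
      (PySem.List.pyRange 0 ((minors_sorted.length : Int) - 1)).foldl (fun gaps i =>
        let current := PySem.List.pyGetD minors_sorted i 0
        let next_num := PySem.List.pyGetD minors_sorted (i + 1) 0
        if next_num - current > 1 then
          gaps ++ (PySem.List.pyRange (current + 1) next_num).map
            (fun missing => PySem.Int.toStr p.1 ++ "." ++ PySem.Int.toStr missing)
        else gaps) gaps) []

-- ===== PORT B =====
def find_section_gaps_alt (sections : List (List (String × Int))) : List String :=
  if sections = [] then []
  else
    let by_major : PySem.Dict Int (PySem.Set Int) :=
      sections.foldl (fun d s =>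
        d.modify (pvGetItem s "major") PySem.Set.empty
          (fun st => PySem.Set.add st (pvGetItem s "minor"))) PySem.Dict.empty
    by_major.items.foldl (fun gaps p =>
      -- min/max of a nonempty set; the .getD 0 arms are unreachable (every group holds ≥ 1 minor)
      let lo := (PySem.List.min? p.2 (fun x => x)).getD 0
      let hi := (PySem.List.max? p.2 (fun x => x)).getD 0
      gaps ++ ((PySem.List.pyRange (lo + 1) hi).filter (fun i => !(PySem.Set.contains p.2 i))).map
        (fun i => PySem.Int.toStr p.1 ++ "." ++ PySem.Int.toStr i)) []

-- ===== PRECONDITION & SPEC =====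
-- Pre_ excludes exactly the inputs where Python A raises KeyError: a section dict missing key 'major' or 'minor'.
def Pre_find_section_gaps (sections : List (List (String × Int))) : Prop :=
  ∀ s ∈ sections, (PySem.Dict.mk s).contains "major" = true ∧ (PySem.Dict.mk s).contains "minor" = true
instance (sections : List (List (String × Int))) : Decidable (Pre_find_section_gaps sections) := by unfold Pre_find_section_gaps; infer_instance

def pvWitness_find_section_gaps : (List (List (String × Int))) :=
  [[("major", 1), ("minor", 1)], [("major", 1), ("minor", 4)], [("major", 2), ("minor", 1)]]

def Spec_find_section_gaps (sections : List (List (String × Int))) (out : List String) : Prop := out = find_section_gaps_alt sections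
instance (sections : List (List (String × Int))) (out : List String) : Decidable (Spec_find_section_gaps sections out) := by unfold Spec_find_section_gaps; infer_instance

-- ===== CLAIM (what is proved, stated in full; the proofs are below) =====
def Claim_equal_find_section_gaps : Prop := ∀ (sections : List (List (String × Int))), Dom_find_section_gaps sections → Pre_find_section_gaps sections → Spec_find_section_gaps sections (find_section_gaps sections)

-- ===== LEMMAS AND PROOFS =====

-- the gaps between adjacent elements of a (sorted) list, structurally
def adjGaps : List Int → List Int
  | x :: y :: t => PySem.List.pyRange (x + 1) y ++ adjGaps (y :: t)
  | _ => []

lemma pyRange_one_nil {a b : Int} (h : b ≤ a) : PySem.List.pyRange a b = [] := by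
  rw [List.eq_nil_iff_forall_not_mem]; intro x hx; rw [PySem.List.mem_pyRange_one] at hx; omega

-- A's if-absent-insert-then-append step is a plain modify
lemma stepA_eq_modify (d : PySem.Dict Int (List Int)) (s : List (String × Int)) :
    (let d' := if d.contains (pvGetItem s "major") then d else d.insert (pvGetItem s "major") []
     d'.modify (pvGetItem s "major") [] (fun l => l ++ [pvGetItem s "minor"]))
    = d.modify (pvGetItem s "major") [] (fun l => l ++ [pvGetItem s "minor"]) := by
  show (if d.contains (pvGetItem s "major") then d else d.insert (pvGetItem s "major") []).modify
        (pvGetItem s "major") [] (fun l => l ++ [pvGetItem s "minor"]) = _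
  by_cases h : d.contains (pvGetItem s "major") = true
  · rw [if_pos h]
  · rw [if_neg h]
    simp only [Bool.not_eq_true] at h
    simp only [PySem.Dict.modify, PySem.Dict.getD_insert_self, PySem.Dict.insert_insert_self]
    rw [PySem.Dict.getD_of_not_contains d [] h]

-- B's grouped sets: the value at c after the grouping fold
lemma getD_foldl_modify_setAdd (l : List (Int × Int)) (d : PySem.Dict Int (PySem.Set Int)) (c : Int) :
    (l.foldl (fun d p => d.modify p.1 PySem.Set.empty (fun st => PySem.Set.add st p.2)) d).getD c PySem.Set.empty
    = PySem.Set.update (d.getD c PySem.Set.empty) ((l.filter (fun p => p.1 == c)).map (fun p => p.2)) := by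
  induction l generalizing d with
  | nil => simp [PySem.Set.update]
  | cons a l ih =>
    rw [List.foldl_cons, ih]
    by_cases h : a.1 = c
    · rw [List.filter_cons_of_pos (by simpa using h), List.map_cons, PySem.Set.update_cons]
      congr 1
      rw [PySem.Dict.getD_modify, if_pos h.symm, h]
    · rw [List.filter_cons_of_neg (by simpa using h)]
      congr 1
      rw [PySem.Dict.getD_modify, if_neg (fun hc => h hc.symm)]

-- index loop over adjacent pairs (Nat range) = structural adjGaps
lemma natGaps (ss : List Int) :
    (List.range (ss.length - 1)).flatMap
      (fun i => PySem.List.pyRange (ss.getD i 0 + 1) (ss.getD (i + 1) 0)) = adjGaps ss := by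
  induction ss with
  | nil => simp [adjGaps]
  | cons x rest ih =>
    cases rest with
    | nil => simp [adjGaps]
    | cons y t =>
      rw [show (x :: y :: t).length - 1 = (y :: t).length - 1 + 1 by simp]
      rw [List.range_succ_eq_map, List.flatMap_cons, List.flatMap_map]
      simp only [List.getD_cons_zero, List.getD_cons_succ, adjGaps]
      rw [← ih]
      rfl

-- the same loop with Python's Int-valued range and indexing
lemma idxGaps (ss : List Int) :
    (PySem.List.pyRange 0 ((ss.length : Int) - 1)).flatMap
      (fun i => PySem.List.pyRange (PySem.List.pyGetD ss i 0 + 1) (PySem.List.pyGetD ss (i + 1) 0))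
    = adjGaps ss := by
  cases ss with
  | nil => simp [adjGaps]
  | cons x rest =>
    rw [show ((x :: rest).length : Int) - 1 = ((x :: rest).length - 1 : Nat) by
      simp only [List.length_cons]; omega]
    rw [PySem.List.pyRange_zero_natCast, List.flatMap_map]
    rw [← natGaps (x :: rest)]
    apply List.flatMap_congr
    intro i _
    rw [PySem.List.pyGetD_natCast, show ((i : Int) + 1) = ((i + 1 : Nat) : Int) by push_cast; ring,
      PySem.List.pyGetD_natCast]

-- the core: adjacent gaps of a sorted list = the full span filtered by membership
lemma adjGaps_filter (rest : List Int) : ∀ (x hi : Int),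
    (x :: rest).Pairwise (· ≤ ·) → hi ∈ x :: rest → (∀ z ∈ x :: rest, z ≤ hi) →
    adjGaps (x :: rest)
    = (PySem.List.pyRange (x + 1) hi).filter (fun i => !((x :: rest).contains i)) := by
  induction rest with
  | nil =>
    intro x hi hs hmem hub
    have : hi = x := by simpa using hmem
    subst this
    simp [adjGaps, pyRange_one_nil (by omega : hi ≤ hi + 1)]
  | cons y t ih =>
    intro x hi hs hmem hub
    have hxy : x ≤ y := (List.pairwise_cons.mp hs).1 y (by simp)
    have hyt : (y :: t).Pairwise (· ≤ ·) := (List.pairwise_cons.mp hs).2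
    have hyle : ∀ z ∈ y :: t, y ≤ z := by
      intro z hz
      rcases List.mem_cons.mp hz with h | h
      · omega
      · exact (List.pairwise_cons.mp hyt).1 z h
    have hyhi : y ≤ hi := hub y (by simp)
    have hmem' : hi ∈ y :: t := by
      rcases List.mem_cons.mp hmem with h | h
      · have : hi = y := by omega
        simp [this]
      · exact h
    have hub' : ∀ z ∈ y :: t, z ≤ hi := fun z hz => hub z (List.mem_cons_of_mem _ hz)
    have ihy := ih y hi hyt hmem' hub'
    show PySem.List.pyRange (x + 1) y ++ adjGaps (y :: t) = _
    by_cases hlt : x < y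
    · rw [PySem.List.pyRange_one_append (x+1) y hi (by omega) (by omega), List.filter_append]
      have h1 : (PySem.List.pyRange (x+1) y).filter (fun i => !((x :: y :: t).contains i))
          = PySem.List.pyRange (x+1) y := by
        apply List.filter_eq_self.mpr
        intro z hz
        rw [PySem.List.mem_pyRange_one] at hz
        simp only [List.contains_eq_mem, Bool.not_eq_eq_eq_not, Bool.not_true, decide_eq_false_iff_not]
        intro hzm
        rcases List.mem_cons.mp hzm with h | h
        · omega
        · have := hyle z h; omega
      rw [h1]
      congr 1
      rw [ihy]
      by_cases hyhi' : y < hi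
      · rw [PySem.List.pyRange_one_cons hyhi']
        rw [List.filter_cons_of_neg (by simp [List.contains_eq_mem])]
        apply List.filter_congr
        intro z hz
        rw [PySem.List.mem_pyRange_one] at hz
        have : ¬ (z = x) := by omega
        simp [List.contains_eq_mem, this]
      · have hyeq : hi = y := by omega
        rw [pyRange_one_nil (by omega : hi ≤ y), pyRange_one_nil (by omega : hi ≤ y + 1)]
        simp
    · have hxe : x = y := by omega
      subst hxe
      rw [pyRange_one_nil (by omega : x ≤ x + 1), List.nil_append, ihy]
      apply List.filter_congr
      intro z hz
      simp [List.contains_eq_mem]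

-- per-major equality: A's flattened adjacent-pair scan = B's filtered span, as gap lists
lemma perKey (maj : Int) (ms : List Int) (hne : ms ≠ []) :
    (PySem.List.pyRange 0 (((PySem.List.sorted ms (fun x => x) false).length : Int) - 1)).flatMap
      (fun i =>
        if PySem.List.pyGetD (PySem.List.sorted ms (fun x => x) false) (i + 1) 0
             - PySem.List.pyGetD (PySem.List.sorted ms (fun x => x) false) i 0 > 1 then
          (PySem.List.pyRange (PySem.List.pyGetD (PySem.List.sorted ms (fun x => x) false) i 0 + 1)
              (PySem.List.pyGetD (PySem.List.sorted ms (fun x => x) false) (i + 1) 0)).map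
            (fun missing => PySem.Int.toStr maj ++ "." ++ PySem.Int.toStr missing)
        else [])
    = ((PySem.List.pyRange ((PySem.List.min? (PySem.Set.ofList ms) (fun x => x)).getD 0 + 1)
          ((PySem.List.max? (PySem.Set.ofList ms) (fun x => x)).getD 0)).filter
        (fun i => !(PySem.Set.contains (PySem.Set.ofList ms) i))).map
        (fun i => PySem.Int.toStr maj ++ "." ++ PySem.Int.toStr i) := by
  have hmem_iff : ∀ z, z ∈ PySem.List.sorted ms (fun x => x) false ↔ z ∈ PySem.Set.ofList ms := by
    intro z
    rw [PySem.List.mem_sorted, PySem.Set.mem_ofList]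
  -- drop the redundant `if`: an adjacent pair without a gap contributes an empty range anyway
  have hif : (PySem.List.pyRange 0 (((PySem.List.sorted ms (fun x => x) false).length : Int) - 1)).flatMap
      (fun i =>
        if PySem.List.pyGetD (PySem.List.sorted ms (fun x => x) false) (i + 1) 0
             - PySem.List.pyGetD (PySem.List.sorted ms (fun x => x) false) i 0 > 1 then
          (PySem.List.pyRange (PySem.List.pyGetD (PySem.List.sorted ms (fun x => x) false) i 0 + 1)
              (PySem.List.pyGetD (PySem.List.sorted ms (fun x => x) false) (i + 1) 0)).map
            (fun missing => PySem.Int.toStr maj ++ "." ++ PySem.Int.toStr missing)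
        else [])
      = (PySem.List.pyRange 0 (((PySem.List.sorted ms (fun x => x) false).length : Int) - 1)).flatMap
      (fun i =>
        (PySem.List.pyRange (PySem.List.pyGetD (PySem.List.sorted ms (fun x => x) false) i 0 + 1)
            (PySem.List.pyGetD (PySem.List.sorted ms (fun x => x) false) (i + 1) 0)).map
          (fun missing => PySem.Int.toStr maj ++ "." ++ PySem.Int.toStr missing)) := by
    apply List.flatMap_congr
    intro i _
    split_ifs with h
    · rfl
    · rw [pyRange_one_nil (by omega), List.map_nil]
  rw [hif, ← List.map_flatMap, idxGaps]
  -- name the sorted list and its head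
  obtain ⟨x, rest, hss⟩ : ∃ x rest, PySem.List.sorted ms (fun x => x) false = x :: rest := by
    cases h : PySem.List.sorted ms (fun x => x) false with
    | nil => exact absurd ((PySem.List.sorted_eq_nil_iff ms _ false).mp h) hne
    | cons a b => exact ⟨a, b, rfl⟩
  have hps : (x :: rest).Pairwise (· ≤ ·) := by
    have := PySem.List.sorted_pairwise ms (fun x : Int => x)
    rwa [hss] at this
  -- min of the set is the sorted head
  obtain ⟨lo, hlo⟩ : ∃ lo, PySem.List.min? (PySem.Set.ofList ms) (fun x => x) = some lo := by
    cases h : PySem.List.min? (PySem.Set.ofList ms) (fun x => x) with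
    | none =>
      rw [PySem.List.min?_eq_none_iff] at h
      have : x ∈ PySem.Set.ofList ms := (hmem_iff x).mp (by simp [hss])
      simp [h] at this
    | some lo => exact ⟨lo, rfl⟩
  obtain ⟨hi, hhi⟩ : ∃ hi, PySem.List.max? (PySem.Set.ofList ms) (fun x => x) = some hi := by
    cases h : PySem.List.max? (PySem.Set.ofList ms) (fun x => x) with
    | none =>
      rw [PySem.List.max?_eq_none_iff] at h
      have : x ∈ PySem.Set.ofList ms := (hmem_iff x).mp (by simp [hss])
      simp [h] at this
    | some hi => exact ⟨hi, rfl⟩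
  have hlo_eq : lo = x := by
    have h1 : lo ∈ x :: rest := by
      rw [← hss] at *
      exact (hmem_iff lo).mpr (PySem.List.min?_mem hlo)
    have h2 : x ≤ lo := by
      rcases List.mem_cons.mp h1 with h | h
      · omega
      · exact (List.pairwise_cons.mp hps).1 lo h
    have h3 : lo ≤ x := PySem.List.min?_isMin hlo x ((hmem_iff x).mp (by simp [hss]))
    omega
  have hhi_mem : hi ∈ x :: rest := by
    rw [← hss]; exact (hmem_iff hi).mpr (PySem.List.max?_mem hhi)
  have hhi_ub : ∀ z ∈ x :: rest, z ≤ hi := by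
    intro z hz
    exact PySem.List.max?_isMax hhi z ((hmem_iff z).mp (hss ▸ hz))
  rw [hss, hlo, hhi, Option.getD_some, Option.getD_some, hlo_eq,
    adjGaps_filter rest x hi hps hhi_mem hhi_ub]
  congr 1
  apply List.filter_congr
  intro z _
  have : z ∈ x :: rest ↔ z ∈ PySem.Set.ofList ms := hss ▸ hmem_iff z
  simp only [PySem.Set.contains_eq_listContains, List.contains_eq_mem, this]


-- A's inner loop from any accumulator: shift the accumulator out, drop the if, flatten, apply perKey
lemma innerEq (maj : Int) (ms : List Int) (acc : List String) (hne : ms ≠ []) :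
    (PySem.List.pyRange 0 (((PySem.List.sorted ms (fun x => x) false).length : Int) - 1)).foldl
      (fun gaps i =>
        if PySem.List.pyGetD (PySem.List.sorted ms (fun x => x) false) (i + 1) 0
             - PySem.List.pyGetD (PySem.List.sorted ms (fun x => x) false) i 0 > 1 then
          gaps ++ (PySem.List.pyRange (PySem.List.pyGetD (PySem.List.sorted ms (fun x => x) false) i 0 + 1)
              (PySem.List.pyGetD (PySem.List.sorted ms (fun x => x) false) (i + 1) 0)).map
            (fun missing => PySem.Int.toStr maj ++ "." ++ PySem.Int.toStr missing)
        else gaps) acc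
    = acc ++ ((PySem.List.pyRange ((PySem.List.min? (PySem.Set.ofList ms) (fun x => x)).getD 0 + 1)
          ((PySem.List.max? (PySem.Set.ofList ms) (fun x => x)).getD 0)).filter
        (fun i => !(PySem.Set.contains (PySem.Set.ofList ms) i))).map
        (fun i => PySem.Int.toStr maj ++ "." ++ PySem.Int.toStr i) := by
  rw [PySem.List.foldl_congr_mem _ _
    (fun gaps i => gaps ++
      (if PySem.List.pyGetD (PySem.List.sorted ms (fun x => x) false) (i + 1) 0
           - PySem.List.pyGetD (PySem.List.sorted ms (fun x => x) false) i 0 > 1 then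
        (PySem.List.pyRange (PySem.List.pyGetD (PySem.List.sorted ms (fun x => x) false) i 0 + 1)
            (PySem.List.pyGetD (PySem.List.sorted ms (fun x => x) false) (i + 1) 0)).map
          (fun missing => PySem.Int.toStr maj ++ "." ++ PySem.Int.toStr missing)
      else [])) acc ?_]
  · rw [PySem.List.foldl_append_eq_flatMap]
    congr 1
    exact perKey maj ms hne
  · intro acc' i _
    beta_reduce
    split_ifs with h
    · rfl
    · exact (List.append_nil acc').symm


-- the whole computation on a nonempty input, lets unfolded
lemma mainNE (sections : List (List (String × Int))) :
    ((sections.foldl (fun d s =>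
        (if d.contains (pvGetItem s "major") then d else d.insert (pvGetItem s "major") []).modify
          (pvGetItem s "major") [] (fun l => l ++ [pvGetItem s "minor"])) PySem.Dict.empty).items).foldl
      (fun gaps p =>
        (PySem.List.pyRange 0 (((PySem.List.sorted p.2 (fun x => x) false).length : Int) - 1)).foldl
          (fun gaps i =>
            if PySem.List.pyGetD (PySem.List.sorted p.2 (fun x => x) false) (i + 1) 0
                 - PySem.List.pyGetD (PySem.List.sorted p.2 (fun x => x) false) i 0 > 1 then
              gaps ++ (PySem.List.pyRange (PySem.List.pyGetD (PySem.List.sorted p.2 (fun x => x) false) i 0 + 1)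
                  (PySem.List.pyGetD (PySem.List.sorted p.2 (fun x => x) false) (i + 1) 0)).map
                (fun missing => PySem.Int.toStr p.1 ++ "." ++ PySem.Int.toStr missing)
            else gaps) gaps) []
    = ((sections.foldl (fun d s =>
        d.modify (pvGetItem s "major") PySem.Set.empty
          (fun st => PySem.Set.add st (pvGetItem s "minor"))) PySem.Dict.empty).items).foldl
      (fun gaps p =>
        gaps ++ ((PySem.List.pyRange ((PySem.List.min? p.2 (fun x => x)).getD 0 + 1)
            ((PySem.List.max? p.2 (fun x => x)).getD 0)).filter
          (fun i => !(PySem.Set.contains p.2 i))).map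
          (fun i => PySem.Int.toStr p.1 ++ "." ++ PySem.Int.toStr i)) [] := by
  -- A's grouping step is a plain modify
  rw [PySem.List.foldl_congr_mem sections _
    (fun d s => d.modify (pvGetItem s "major") [] (fun l => l ++ [pvGetItem s "minor"]))
    PySem.Dict.empty (fun d s _ => stepA_eq_modify d s)]
  -- both grouping folds, as folds over (key, minor) pairs
  have hA : sections.foldl
      (fun d s => d.modify (pvGetItem s "major") [] (fun l => l ++ [pvGetItem s "minor"]))
      PySem.Dict.empty
      = ((sections.map (fun s => (pvGetItem s "major", pvGetItem s "minor"))).foldl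
          (fun d p => d.modify p.1 [] (fun l => l ++ [p.2])) PySem.Dict.empty) := by
    rw [List.foldl_map]
  have hkeysA : (sections.foldl
      (fun d s => d.modify (pvGetItem s "major") [] (fun l => l ++ [pvGetItem s "minor"]))
      PySem.Dict.empty).keys = PySem.Set.ofList (sections.map (fun s => pvGetItem s "major")) := by
    rw [PySem.Dict.keys_foldl_modify_key sections (fun s => pvGetItem s "major") [] _ PySem.Dict.empty,
      PySem.Dict.keys_empty, PySem.Set.update_nil_left]
  have hkeysB : (sections.foldl (fun d s =>
      d.modify (pvGetItem s "major") PySem.Set.empty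
        (fun st => PySem.Set.add st (pvGetItem s "minor"))) PySem.Dict.empty).keys
      = PySem.Set.ofList (sections.map (fun s => pvGetItem s "major")) := by
    rw [PySem.Dict.keys_foldl_modify_key sections (fun s => pvGetItem s "major") PySem.Set.empty _
      PySem.Dict.empty, PySem.Dict.keys_empty, PySem.Set.update_nil_left]
  have hndA := PySem.Dict.nodup_keys_foldl_modify_key sections (fun s => pvGetItem s "major") []
    (fun _ s => fun l => l ++ [pvGetItem s "minor"]) PySem.Dict.empty PySem.Dict.nodup_keys_empty
  have hndB := PySem.Dict.nodup_keys_foldl_modify_key sections (fun s => pvGetItem s "major")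
    PySem.Set.empty (fun _ s => fun st => PySem.Set.add st (pvGetItem s "minor"))
    PySem.Dict.empty PySem.Dict.nodup_keys_empty
  have hgetA : ∀ c, (sections.foldl
      (fun d s => d.modify (pvGetItem s "major") [] (fun l => l ++ [pvGetItem s "minor"]))
      PySem.Dict.empty).getD c []
      = ((sections.map (fun s => (pvGetItem s "major", pvGetItem s "minor"))).filter
          (fun p => p.1 == c)).map (fun p => p.2) := by
    intro c
    rw [hA, PySem.Dict.getD_foldl_modify_append _ PySem.Dict.empty c, PySem.Dict.getD_empty,
      List.nil_append]
  have hgetB : ∀ c, (sections.foldl (fun d s =>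
      d.modify (pvGetItem s "major") PySem.Set.empty
        (fun st => PySem.Set.add st (pvGetItem s "minor"))) PySem.Dict.empty).getD c PySem.Set.empty
      = PySem.Set.ofList (((sections.map (fun s => (pvGetItem s "major", pvGetItem s "minor"))).filter
          (fun p => p.1 == c)).map (fun p => p.2)) := by
    intro c
    have hB : sections.foldl (fun d s =>
        d.modify (pvGetItem s "major") PySem.Set.empty
          (fun st => PySem.Set.add st (pvGetItem s "minor"))) PySem.Dict.empty
        = ((sections.map (fun s => (pvGetItem s "major", pvGetItem s "minor"))).foldl
            (fun d p => d.modify p.1 PySem.Set.empty (fun st => PySem.Set.add st p.2))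
            PySem.Dict.empty) := by
      rw [List.foldl_map]
    rw [hB, getD_foldl_modify_setAdd _ PySem.Dict.empty c, PySem.Dict.getD_empty,
      PySem.Set.update_empty]
  -- items of both dicts over the common key list
  rw [PySem.Dict.items_eq_map_keys _ hndA [], PySem.Dict.items_eq_map_keys _ hndB PySem.Set.empty,
    hkeysA, hkeysB, List.foldl_map, List.foldl_map]
  apply PySem.List.foldl_congr_mem
  intro acc k hk
  beta_reduce
  -- the group of minors for this key is nonempty
  have hne : ((sections.map (fun s => (pvGetItem s "major", pvGetItem s "minor"))).filter
      (fun p => p.1 == k)).map (fun p => p.2) ≠ [] := by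
    rw [PySem.Set.mem_ofList] at hk
    obtain ⟨s, hs, hks⟩ := List.mem_map.mp hk
    apply List.ne_nil_of_mem (a := pvGetItem s "minor")
    exact List.mem_map.mpr ⟨(pvGetItem s "major", pvGetItem s "minor"),
      List.mem_filter.mpr ⟨List.mem_map.mpr ⟨s, hs, rfl⟩, by simpa using hks⟩, rfl⟩
  rw [hgetA k, hgetB k]
  exact innerEq k _ acc hne

-- ===== VERDICT (by name: the statement is the Claim_ definition above) =====
theorem find_section_gaps_spec : Claim_equal_find_section_gaps := by
  intro sections _ _
  unfold Spec_find_section_gaps find_section_gaps find_section_gaps_alt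
  by_cases hnil : sections = []
  · simp [hnil]
  · rw [if_neg hnil, if_neg hnil]
    exact mainNE sections
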